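-- pv_equiv track=rewrite | github.com/python/cpython | Lib/email/utils.py | _strip_quoted_realnames
-- ===== SOURCE A (Python) =====
-- def _iter_escaped_chars(addr):
--     pos = 0
--     escape = False
--     for pos, ch in enumerate(addr):
--         if escape:
--             yield (pos, '\\' + ch)
--             escape = False
--         elif ch == '\\':
--             escape = True
--         else:
--             yield (pos, ch)
--     if escape:
--         yield (pos, '\\')
--
-- def _strip_quoted_realnames(addr):
--     """Strip real names between quotes."""
--     if '"' not in addr:
--         # Fast path
--         return addr
--
--     start = 0
--     open_pos = None
--     result = []
--     for pos, ch in _iter_escaped_chars(addr):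
--         if ch == '"':
--             if open_pos is None:
--                 open_pos = pos
--             else:
--                 if start != open_pos:
--                     result.append(addr[start:open_pos])
--                 start = pos + 1
--                 open_pos = None
--
--     if start < len(addr):
--         result.append(addr[start:])
--
--     return ''.join(result)
-- ===== SOURCE B (Python) =====
-- import re
--
-- # One regex substitution replaces the hand-written escape state machine: the
-- # `\\.` alternative (DOTALL) consumes any escape pair verbatim, so an escaped
-- # quote can never open/close a quoted region, and the captured alternative
-- # matches a complete balanced quoted string, which the callback deletes.
-- _QUOTED = re.compile(r'\\.|("(?:\\.|[^"\\])*")', re.DOTALL)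
--
-- def _strip_quoted_realnames(addr):
--     """Strip real names between quotes."""
--     return _QUOTED.sub(lambda m: '' if m.group(1) else m.group(0), addr)
-- ===== Notes on version B (the rewrite author's own statement) =====
-- stated objective: idiomatic
-- what changed: Replaces the generator-based escape state machine that collects slice indices with a single regex substitution (ported as a tokenizer with quoted-string lookahead) that consumes escape pairs verbatim and deletes balanced quoted strings.
import Mathlib
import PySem

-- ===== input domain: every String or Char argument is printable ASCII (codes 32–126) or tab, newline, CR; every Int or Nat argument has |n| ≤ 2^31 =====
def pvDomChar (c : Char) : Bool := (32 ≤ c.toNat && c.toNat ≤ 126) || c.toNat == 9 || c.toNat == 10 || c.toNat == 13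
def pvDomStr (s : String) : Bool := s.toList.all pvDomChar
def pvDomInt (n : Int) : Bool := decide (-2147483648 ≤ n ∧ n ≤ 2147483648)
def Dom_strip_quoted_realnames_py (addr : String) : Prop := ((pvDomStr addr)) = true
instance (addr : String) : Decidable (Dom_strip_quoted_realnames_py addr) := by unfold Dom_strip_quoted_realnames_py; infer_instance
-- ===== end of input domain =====

-- B replaces A's generator-based escape state machine (which records slice indices)
-- by a single regex substitution; its Lean port is the hand transliteration of that
-- regex as a tokenizer with quoted-string lookahead.  Objective: idiomatic; not faster.

-- ===== PORT A =====
-- _iter_escaped_chars: tokens (pos, ch) where ch is a 1- or 2-char Python string,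
-- represented here as a List Char; `escape`/`p` are the generator's state.
def iecGo (s : List Char) (escape : Bool) (p : Int) : List (Int × List Char) :=
  match s with
  | [] => if escape then [(p - 1, ['\\'])] else []
  | ch :: r =>
    if escape then (p, ['\\', ch]) :: iecGo r false (p + 1)
    else if ch = '\\' then iecGo r true (p + 1)
    else (p, [ch]) :: iecGo r false (p + 1)

-- one iteration of A's for-loop; state = (start, open_pos, result)
def stepA (l : List Char) (st : Int × Option Int × List (List Char)) (t : Int × List Char) :
    Int × Option Int × List (List Char) :=
  if t.2 = ['"'] then
    match st.2.1 with
    | none => (st.1, some t.1, st.2.2)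
    | some op =>
        (t.1 + 1, none,
         if st.1 ≠ op then st.2.2 ++ [PySem.List.slice l (some st.1) (some op)] else st.2.2)
  else st

def strip_quoted_realnames_py (addr : String) : String :=
  -- '"' not in addr  (substring test, exact via PySem.Str.isIn)
  if PySem.Str.isIn "\"" addr = false then addr
  else
    let l := addr.toList
    let st := (iecGo l false 0).foldl (stepA l) (0, none, [])
    let res :=
      if st.1 < (l.length : Int) then st.2.2 ++ [PySem.List.slice l (some st.1) none] else st.2.2
    String.ofList (PySem.Chars.join [] res)

-- ===== PORT B =====
-- hand transliteration of the regex r'\\.|("(?:\\.|[^"\\])*")' with re.DOTALL: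
-- findClose scans for the closing unescaped quote (the quoted-string alternative's
-- lookahead); tok applies the alternatives left to right at each position,
-- deleting a matched quoted string and keeping everything else verbatim.
def findClose (s : List Char) : Option (List Char) :=
  match s with
  | [] => none
  | '\\' :: _ :: r => findClose r
  | '"' :: r => some r
  | _ :: r => findClose r

theorem findClose_length : ∀ (s r' : List Char), findClose s = some r' → r'.length < s.length := by
  intro s
  induction s using findClose.induct with
  | case1 => intro r' h; simp [findClose] at h
  | case2 c r ih => intro r' h; rw [findClose] at h; have := ih r' h; simp; omega
  | case3 r => intro r' h; rw [findClose] at h; cases h; simp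
  | case4 c r h1 h2 ih =>
    intro r' h
    rw [findClose] at h
    · have := ih r' h; simp; omega
    · exact h1
    · exact h2

def tok (s : List Char) : List Char :=
  match s with
  | [] => []
  | '\\' :: c :: r => '\\' :: c :: tok r
  | '"' :: r =>
    match h : findClose r with
    | some r' => tok r'
    | none => '"' :: tok r
  | c :: r => c :: tok r
termination_by s.length
decreasing_by
  all_goals simp
  all_goals first
    | omega
    | (have := findClose_length r r' h; omega)

def strip_quoted_realnames_py_alt (addr : String) : String :=
  String.ofList (tok addr.toList)

-- ===== PRECONDITION & SPEC =====
def Spec_strip_quoted_realnames_py (addr : String) (out : String) : Prop := out = strip_quoted_realnames_py_alt addr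
instance (addr : String) (out : String) : Decidable (Spec_strip_quoted_realnames_py addr out) := by unfold Spec_strip_quoted_realnames_py; infer_instance

-- ===== CLAIM (what is proved, stated in full; the proofs are below) =====
def Claim_equal_strip_quoted_realnames_py : Prop := ∀ (addr : String), Dom_strip_quoted_realnames_py addr → Spec_strip_quoted_realnames_py addr (strip_quoted_realnames_py addr)

-- ===== LEMMAS AND PROOFS =====
theorem findClose_esc (c : Char) (r : List Char) : findClose ('\\' :: c :: r) = findClose r := rfl
theorem findClose_quote (r : List Char) : findClose ('"' :: r) = some r := rfl
theorem findClose_other (c : Char) (r : List Char) (hb : c ≠ '\\') (hq : c ≠ '"') :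
    findClose (c :: r) = findClose r := by
  rw [findClose.eq_def]
  rcases r with _ | ⟨d, r⟩ <;> simp [hb, hq]
theorem tok_nil : tok [] = [] := by rw [tok]
theorem tok_esc (c : Char) (r : List Char) : tok ('\\' :: c :: r) = '\\' :: c :: tok r := by
  rw [tok]
theorem tok_bs_nil : tok ['\\'] = ['\\'] := by rw [tok.eq_def]; simp [tok_nil]
theorem tok_quote_some (r r' : List Char) (h : findClose r = some r') :
    tok ('"' :: r) = tok r' := by
  rw [tok.eq_def]
  split
  · simp_all
  · simp_all
  · next s heq =>
    simp at heq
    subst heq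
    split <;> simp_all
  · next c s hne1 hne2 heq =>
    simp at heq
    exact absurd heq.1.symm hne2
theorem tok_quote_none (r : List Char) (h : findClose r = none) :
    tok ('"' :: r) = '"' :: tok r := by
  rw [tok.eq_def]
  split
  · simp_all
  · simp_all
  · next s heq =>
    simp at heq
    subst heq
    split <;> simp_all
  · next c s hne1 hne2 heq =>
    simp at heq
    exact absurd heq.1.symm hne2
theorem tok_other (c : Char) (r : List Char) (hb : c ≠ '\\') (hq : c ≠ '"') :
    tok (c :: r) = c :: tok r := by
  rw [tok.eq_def]
  rcases r with _ | ⟨d, r⟩ <;> simp [hb, hq]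

theorem tok_noclose : ∀ (s : List Char), findClose s = none → tok s = s := by
  intro s
  induction s using findClose.induct with
  | case1 => intro _; exact tok_nil
  | case2 c r ih => intro h; rw [findClose_esc] at h; rw [tok_esc, ih h]
  | case3 r => intro h; simp [findClose_quote] at h
  | case4 c r h1 h2 ih =>
    intro h
    by_cases hb : c = '\\'
    · subst hb
      rcases r with _ | ⟨d, r⟩
      · exact tok_bs_nil
      · exact absurd (h1 d r rfl rfl) (by simp)
    · have hq : c ≠ '"' := fun hc => h2 hc
      rw [findClose_other c r hb hq] at h
      rw [tok_other c r hb hq, ih h]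

theorem tok_noquote : ∀ (s : List Char), '"' ∉ s → tok s = s := by
  intro s
  induction s using tok.induct with
  | case1 => intro _; exact tok_nil
  | case2 c r ih => intro h; rw [tok_esc, ih (fun hm => h (List.mem_cons_of_mem _ (List.mem_cons_of_mem _ hm)))]
  | case3 r r' hfc ih => intro h; simp at h
  | case4 r hfc ih => intro h; simp at h
  | case5 c r h1 h2 ih =>
    intro h
    by_cases hb : c = '\\'
    · subst hb
      rcases r with _ | ⟨d, r⟩
      · exact tok_bs_nil
      · exact absurd (h1 d r rfl rfl) (by simp)
    · have hq : c ≠ '"' := by intro hc; subst hc; simp at h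
      rw [tok_other c r hb hq, ih (fun hm => h (List.mem_cons_of_mem _ hm))]
-- slice bookkeeping for A's (start, open_pos) indices
def strSlice (l : List Char) (a b : Nat) : List Char := (l.drop a).take (b - a)

theorem strSlice_self (l : List Char) (p : Nat) : strSlice l p p = [] := by
  simp [strSlice]

theorem strSlice_len (l : List Char) (a : Nat) : strSlice l a l.length = l.drop a := by
  simp [strSlice]

theorem strSlice_snoc (l : List Char) (s p : Nat) (c : Char) (r : List Char)
    (h : l.drop p = c :: r) (hsp : s ≤ p) : strSlice l s (p + 1) = strSlice l s p ++ [c] := by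
  have hgp : l[p]? = some c := by
    have h0 : (l.drop p)[0]? = some c := by rw [h]; rfl
    simpa [List.getElem?_drop] using h0
  calc strSlice l s (p + 1) = (l.drop s).take ((p - s) + 1) := by
        unfold strSlice; congr 1; omega
    _ = (l.drop s).take (p - s) ++ ((l.drop s)[p - s]?).toList := List.take_succ
    _ = strSlice l s p ++ [c] := by
        rw [List.getElem?_drop, show s + (p - s) = p by omega, hgp]; rfl

theorem strSlice_append_drop (l : List Char) (s p : Nat) (hsp : s ≤ p) :
    strSlice l s p ++ l.drop p = l.drop s := by
  have : l.drop p = (l.drop s).drop (p - s) := by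
    rw [List.drop_drop]; congr 1; omega
  rw [strSlice, this, List.take_append_drop]

theorem drop_cons_succ (l : List Char) (p : Nat) (c : Char) (r : List Char)
    (h : l.drop p = c :: r) : l.drop (p + 1) = r := by
  have := congrArg (List.drop 1) h
  simpa [List.drop_drop, Nat.add_comm] using this
-- A's loop, packaged: fold the remaining token stream, then the final tail append
def outA (l : List Char) (stream : List (Int × List Char))
    (st : Int × Option Int × List (List Char)) : List Char :=
  let st' := stream.foldl (stepA l) st
  (if st'.1 < (l.length : Int) then st'.2.2 ++ [PySem.List.slice l (some st'.1) none]
   else st'.2.2).flatten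

theorem outA_cons (l : List Char) (t : Int × List Char) (ts : List (Int × List Char))
    (st : Int × Option Int × List (List Char)) :
    outA l (t :: ts) st = outA l ts (stepA l st t) := rfl

theorem outA_nil (l : List Char) (start : Nat) (op? : Option Int) (res : List (List Char))
    (hs : start ≤ l.length) :
    outA l [] ((start : Int), op?, res) = res.flatten ++ l.drop start := by
  unfold outA
  simp only [List.foldl_nil]
  by_cases h : (start : Int) < (l.length : Int)
  · simp [h, PySem.List.slice_from_natCast]
  · have he : start = l.length := by omega
    simp [h, he]

theorem stepA_not_quote (l : List Char) (st : Int × Option Int × List (List Char))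
    (pos : Int) (tk : List Char) (h : tk ≠ ['"']) : stepA l st (pos, tk) = st := by
  simp [stepA, h]

theorem stepA_open (l : List Char) (start : Int) (res : List (List Char)) (pos : Int) :
    stepA l (start, none, res) (pos, ['"']) = (start, some pos, res) := by
  simp [stepA]

theorem stepA_close (l : List Char) (start op : Int) (res : List (List Char)) (pos : Int) :
    stepA l (start, some op, res) (pos, ['"']) =
      (pos + 1, none,
       if start ≠ op then res ++ [PySem.List.slice l (some start) (some op)] else res) := by
  simp [stepA]

-- the value A still produces from an open-quote state, phrased on the suffix
def rhsOpen (l : List Char) (start op : Nat) (s : List Char) : List Char :=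
  match findClose s with
  | some r' => strSlice l start op ++ tok r'
  | none => strSlice l start l.length

theorem mainLem : ∀ (k : Nat) (l : List Char) (p : Nat), (l.drop p).length = k → p ≤ l.length →
    (∀ (start : Nat) (res : List (List Char)), start ≤ p →
       outA l (iecGo (l.drop p) false (p : Int)) ((start : Int), none, res) =
         res.flatten ++ strSlice l start p ++ tok (l.drop p)) ∧
    (∀ (start op : Nat) (res : List (List Char)), start ≤ p →
       outA l (iecGo (l.drop p) false (p : Int)) ((start : Int), some (op : Int), res) =
         res.flatten ++ rhsOpen l start op (l.drop p)) := by
  intro k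
  induction k using Nat.strong_induction_on with
  | _ k ih =>
    intro l p hk hp
    rcases hdrop : l.drop p with _ | ⟨c, r⟩
    · -- suffix empty: p = l.length
      have hpe : p = l.length := by
        have := List.drop_eq_nil_iff.mp hdrop
        omega
      constructor
      · intro start res hs
        rw [show iecGo ([] : List Char) false (p : Int) = [] from rfl,
            outA_nil l start none res (hs.trans hp), tok_nil, hpe, strSlice_len]
        simp
      · intro start op res hs
        rw [show iecGo ([] : List Char) false (p : Int) = [] from rfl,
            outA_nil l start _ res (hs.trans hp)]
        simp [rhsOpen, findClose, strSlice_len]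
    · have hlen : l.length - p = k := by rw [← List.length_drop, hk]
      have hkpos : 0 < k := by rw [← hk, hdrop]; simp
      have hdrop1 : l.drop (p + 1) = r := drop_cons_succ l p c r hdrop
      by_cases hbs : c = '\\'
      · subst hbs
        rcases r with _ | ⟨d, r2⟩
        · -- lone trailing backslash: one token ['\\'], then end; p + 1 = l.length
          have hpe : p + 1 = l.length := by
            have := List.drop_eq_nil_iff.mp hdrop1
            have : p < l.length := by omega
            omega
          have hstream : iecGo ['\\'] false (p : Int) = [((p : Int), ['\\'])] := by
            simp [iecGo]
          constructor
          · intro start res hs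
            rw [hstream, outA_cons, stepA_not_quote _ _ _ _ (by simp),
                outA_nil l start _ res (by omega), tok_bs_nil]
            have hx : strSlice l start p ++ ['\\'] = l.drop start := by
              rw [← strSlice_snoc l start p '\\' [] hdrop hs, hpe, strSlice_len]
            rw [List.append_assoc, hx]
          · intro start op res hs
            rw [hstream, outA_cons, stepA_not_quote _ _ _ _ (by simp),
                outA_nil l start _ res (by omega)]
            simp [rhsOpen, findClose, strSlice_len]
        · -- escape pair: token (p+1, ['\\', d]); recurse at p + 2
          have hdrop2 : l.drop (p + 2) = r2 := by
            have := drop_cons_succ l (p + 1) d r2 hdrop1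
            simpa using this
          have hk2 : (l.drop (p + 2)).length = k - 2 := by rw [hdrop2]; rw [hdrop] at hk; simp at hk; omega
          have hkgt : 2 ≤ k := by rw [hdrop] at hk; simp at hk; omega
          have hp2 : p + 2 ≤ l.length := by omega
          have IH := ih (k - 2) (by omega) l (p + 2) hk2 hp2
          rw [hdrop2] at IH
          have hstream : iecGo ('\\' :: d :: r2) false (p : Int) =
              ((p : Int) + 1, ['\\', d]) :: iecGo r2 false ((p + 2 : Nat) : Int) := by
            simp [iecGo]; push_cast; ring_nf
          have hsl : ∀ start : Nat, start ≤ p →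
              strSlice l start (p + 2) = strSlice l start p ++ ['\\', d] := by
            intro start hs
            rw [show p + 2 = (p + 1) + 1 by ring,
                strSlice_snoc l start (p + 1) d r2 hdrop1 (by omega),
                strSlice_snoc l start p '\\' _ hdrop hs]
            simp
          constructor
          · intro start res hs
            rw [hstream, outA_cons, stepA_not_quote _ _ _ _ (by simp),
                (IH.1 start res (by omega)), tok_esc, hsl start hs]
            simp
          · intro start op res hs
            rw [hstream, outA_cons, stepA_not_quote _ _ _ _ (by simp),
                (IH.2 start op res (by omega))]
            simp [rhsOpen, findClose_esc]
      · have hp1 : p + 1 ≤ l.length := by omega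
        have hk1 : (l.drop (p + 1)).length = k - 1 := by rw [hdrop1]; rw [hdrop] at hk; simp at hk; omega
        have IH := ih (k - 1) (by omega) l (p + 1) hk1 hp1
        rw [hdrop1] at IH
        by_cases hq : c = '"'
        · subst hq
          have hstream : iecGo ('"' :: r) false (p : Int) =
              ((p : Int), ['"']) :: iecGo r false ((p + 1 : Nat) : Int) := by
            simp [iecGo, hbs]
          constructor
          · intro start res hs
            rw [hstream, outA_cons, stepA_open, (IH.2 start p res (by omega))]
            unfold rhsOpen
            rcases hfc : findClose r with _ | r'
            · simp only []
              rw [tok_quote_none r hfc, tok_noclose r hfc, strSlice_len]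
              have hx : strSlice l start p ++ '"' :: r = l.drop start := by
                have h2 := strSlice_append_drop l start p hs
                rw [hdrop] at h2; exact h2
              rw [List.append_assoc, hx]
            · simp [tok_quote_some r r' hfc]
          · intro start op res hs
            rw [hstream, outA_cons, stepA_close]
            have hres : (if (start : Int) ≠ (op : Int) then
                res ++ [PySem.List.slice l (some (start : Int)) (some (op : Int))] else res).flatten
                = res.flatten ++ strSlice l start op := by
              by_cases he : start = op
              · simp [he, strSlice_self]
              · have : (start : Int) ≠ (op : Int) := by exact_mod_cast he
                simp [this, PySem.List.slice_natCast, strSlice]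
            rw [show ((p : Int) + 1) = ((p + 1 : Nat) : Int) by push_cast; ring,
                (IH.1 (p + 1) _ (le_refl _)), strSlice_self, hres]
            simp [rhsOpen, findClose_quote]
        · -- ordinary character
          have hstream : iecGo (c :: r) false (p : Int) =
              ((p : Int), [c]) :: iecGo r false ((p + 1 : Nat) : Int) := by
            simp [iecGo, hbs]
          have htk : [c] ≠ ['"'] := by simp [hq]
          constructor
          · intro start res hs
            rw [hstream, outA_cons, stepA_not_quote _ _ _ _ htk,
                (IH.1 start res (by omega)), tok_other c r hbs hq,
                strSlice_snoc l start p c r hdrop hs]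
            simp
          · intro start op res hs
            rw [hstream, outA_cons, stepA_not_quote _ _ _ _ htk,
                (IH.2 start op res (by omega))]
            simp [rhsOpen, findClose_other c r hbs hq]
theorem chars_join_nil : ∀ (parts : List (List Char)), PySem.Chars.join [] parts = parts.flatten := by
  intro parts
  induction parts with
  | nil => simp [PySem.Chars.join, List.intercalate]
  | cons x xs ih =>
    cases xs <;> simp_all [PySem.Chars.join, List.intercalate, List.intersperse]

theorem A_eq (addr : String) :
    strip_quoted_realnames_py addr = String.ofList (tok addr.toList) := by
  unfold strip_quoted_realnames_py
  by_cases h : PySem.Str.isIn "\"" addr = false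
  · rw [if_pos h]
    have hq : '"' ∉ addr.toList := by
      intro hm
      have hinf : ("\"" : String).toList <:+: addr.toList := by
        obtain ⟨s, t, hst⟩ := List.mem_iff_append.mp hm
        exact ⟨s, t, by simp [hst]⟩
      rw [← PySem.Str.isIn_iff_infix] at hinf
      rw [h] at hinf
      cases hinf
    rw [tok_noquote _ hq]
    exact (String.ofList_toList).symm
  · rw [if_neg h]
    have hmain := (mainLem addr.toList.length addr.toList 0 (by simp) (by simp)).1 0 [] (le_refl 0)
    simp only [List.drop_zero, Nat.cast_zero, List.flatten_nil, List.nil_append,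
      strSlice_self] at hmain
    simp only [chars_join_nil]
    exact congrArg String.ofList hmain

-- ===== VERDICT (by name: the statement is the Claim_ definition above) =====
theorem strip_quoted_realnames_py_spec : Claim_equal_strip_quoted_realnames_py := by
  intro addr _
  unfold Spec_strip_quoted_realnames_py strip_quoted_realnames_py_alt
  exact A_eq addr
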